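-- pv_equiv track=rewrite | github.com/josh140520/Monitoring_Final2 | main.py | sum_consecutive
-- ===== SOURCE A (Python) =====
-- def sum_consecutive(lst):
--     if not lst:
--         return 0  # Return 0 for an empty list
--
--     current_number = lst[0]
--     current_count = 1
--     max_number = current_number
--     max_count = current_count
--
--     for num in lst[1:]:
--         if num == current_number:
--             current_count += 1
--         else:
--             current_number = num
--             current_count = 1
--
--         if current_count > max_count:
--             max_count = current_count
--             max_number = current_number
--
--     return max_number * max_count
-- ===== SOURCE B (Python) =====
-- def sum_consecutive(lst):
--     if not lst:
--         return 0
--     runs = []  # list of (value, run_length)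
--     for x in lst:
--         if runs and runs[-1][0] == x:
--             runs[-1] = (x, runs[-1][1] + 1)
--         else:
--             runs.append((x, 1))
--     v, c = max(runs, key=lambda vc: vc[1])  # first maximal-length run on ties
--     return v * c
-- ===== Notes on version B (the rewrite author's own statement) =====
-- stated objective: idiomatic
-- what changed: B decomposes the task into two phases: build the list of (value, length) runs, then pick the first longest run with max(key=length), instead of A's single fused loop carrying four state variables.
import Mathlib
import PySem

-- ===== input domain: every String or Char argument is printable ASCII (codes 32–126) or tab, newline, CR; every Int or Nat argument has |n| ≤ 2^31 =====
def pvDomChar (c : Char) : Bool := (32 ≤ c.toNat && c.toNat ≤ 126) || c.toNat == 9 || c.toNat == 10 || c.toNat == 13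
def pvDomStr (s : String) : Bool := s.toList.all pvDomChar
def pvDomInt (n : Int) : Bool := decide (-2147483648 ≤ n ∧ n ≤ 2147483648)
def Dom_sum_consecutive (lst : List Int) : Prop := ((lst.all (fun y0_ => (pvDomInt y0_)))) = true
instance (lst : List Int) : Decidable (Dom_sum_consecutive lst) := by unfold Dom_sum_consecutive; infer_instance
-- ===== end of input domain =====

-- B builds the explicit list of (value, length) runs and then selects the first longest run
-- with a max-by-length pass, instead of A's single fused loop; idiomatic two-phase decomposition, same cost.


-- ===== PORT A =====
-- state = (current_number, current_count, max_number, max_count)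
def pvAStep (s : Int × Int × Int × Int) (num : Int) : Int × Int × Int × Int :=
  let cn := s.1; let cc := s.2.1; let mn := s.2.2.1; let mc := s.2.2.2
  let p := if num = cn then (cn, cc + 1) else (num, 1)
  if p.2 > mc then (p.1, p.2, p.1, p.2) else (p.1, p.2, mn, mc)

def sum_consecutive (lst : List Int) : Int :=
  match lst with
  | [] => 0
  | h :: t =>
    let s := t.foldl pvAStep (h, 1, h, 1)
    s.2.2.1 * s.2.2.2

-- ===== PORT B =====
-- one step of B's run-building loop: extend the last run or start a new one
def pvBStep (rs : List (Int × Int)) (x : Int) : List (Int × Int) :=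
  match rs.getLast? with
  | some (v, c) => if v = x then rs.dropLast ++ [(x, c + 1)] else rs ++ [(x, 1)]
  | none => [(x, 1)]

-- Python's max(runs, key=length): keep the earlier run unless a strictly longer one appears
def pvPick (b r : Int × Int) : Int × Int := if r.2 > b.2 then r else b

-- max(rs, key=len); Python raises on empty rs, which B never reaches (lst nonempty ⇒ rs nonempty)
def pvMaxByLen (rs : List (Int × Int)) : Int × Int :=
  match rs with
  | [] => (0, 0)
  | h :: t => t.foldl pvPick h

def sum_consecutive_alt (lst : List Int) : Int :=
  if lst = [] then 0
  else
    let rs := lst.foldl pvBStep []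
    let best := pvMaxByLen rs
    best.1 * best.2

-- ===== PRECONDITION & SPEC =====
def Spec_sum_consecutive (lst : List Int) (out : Int) : Prop := out = sum_consecutive_alt lst
instance (lst : List Int) (out : Int) : Decidable (Spec_sum_consecutive lst out) := by unfold Spec_sum_consecutive; infer_instance

-- ===== CLAIM (what is proved, stated in full; the proofs are below) =====
def Claim_equal_sum_consecutive : Prop := ∀ (lst : List Int), Dom_sum_consecutive lst → Spec_sum_consecutive lst (sum_consecutive lst)

-- ===== LEMMAS AND PROOFS =====

-- pvPick starting from an optional accumulated best
def pvPick' (o : Option (Int × Int)) (last : Int × Int) : Int × Int :=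
  match o with
  | none => last
  | some b => pvPick b last

-- the first-maximal run of a nonempty run list, as an option
def pvFM? (rs : List (Int × Int)) : Option (Int × Int) :=
  match rs with
  | [] => none
  | h :: t => some (t.foldl pvPick h)

-- A's loop state reconstructed from B's run list
def pvStateOf (rs : List (Int × Int)) : Int × Int × Int × Int :=
  let l := rs.getLastD (0, 0)
  (l.1, l.2, pvPick' (pvFM? rs.dropLast) l)

lemma pvPick_pos {b r : Int × Int} (hb : 1 ≤ b.2) (hr : 1 ≤ r.2) : 1 ≤ (pvPick b r).2 := by
  unfold pvPick; split <;> assumption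

lemma pvFold_pick_pos (t : List (Int × Int)) (b : Int × Int) (hb : 1 ≤ b.2)
    (ht : ∀ r ∈ t, 1 ≤ r.2) : 1 ≤ (t.foldl pvPick b).2 := by
  induction t generalizing b with
  | nil => exact hb
  | cons x xs ih =>
    simp only [List.foldl_cons]
    exact ih _ (pvPick_pos hb (ht x (by simp))) (fun r hr => ht r (by simp [hr]))

lemma pvPick'_pos (init : List (Int × Int)) (l : Int × Int) (hl : 1 ≤ l.2)
    (hi : ∀ r ∈ init, 1 ≤ r.2) : 1 ≤ (pvPick' (pvFM? init) l).2 := by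
  cases init with
  | nil => exact hl
  | cons h t =>
    simp only [pvFM?, pvPick']
    exact pvPick_pos (pvFold_pick_pos t h (hi h (by simp)) (fun r hr => hi r (by simp [hr]))) hl

lemma pvMaxByLen_concat (init : List (Int × Int)) (l : Int × Int) :
    pvMaxByLen (init ++ [l]) = pvPick' (pvFM? init) l := by
  cases init with
  | nil => simp [pvMaxByLen, pvPick', pvFM?]
  | cons h t => simp [pvMaxByLen, pvPick', pvFM?, List.foldl_append]

lemma pvFM_concat (init : List (Int × Int)) (l : Int × Int) :
    pvFM? (init ++ [l]) = some (pvPick' (pvFM? init) l) := by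
  cases init with
  | nil => simp [pvFM?, pvPick']
  | cons h t => simp [pvFM?, pvPick', List.foldl_append]

lemma pvBFold_ne_nil (t : List Int) (rs : List (Int × Int)) (h : rs ≠ []) :
    t.foldl pvBStep rs ≠ [] := by
  induction t generalizing rs with
  | nil => exact h
  | cons x xs ih =>
    simp only [List.foldl_cons]
    apply ih
    unfold pvBStep
    split
    · split <;> simp
    · simp

-- main invariant: A's fold over the suffix equals the state read off B's fold over the suffix
lemma pv_main (t : List Int) : ∀ (init : List (Int × Int)) (cn cc : Int),
    1 ≤ cc → (∀ r ∈ init, 1 ≤ r.2) →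
    t.foldl pvAStep (cn, cc, pvPick' (pvFM? init) (cn, cc))
      = pvStateOf (t.foldl pvBStep (init ++ [(cn, cc)])) := by
  induction t with
  | nil =>
    intro init cn cc _ _
    simp [pvStateOf, List.getLastD_concat, List.dropLast_concat]
  | cons x xs ih =>
    intro init cn cc hcc hinit
    simp only [List.foldl_cons]
    have hlast : (init ++ [(cn, cc)]).getLast? = some (cn, cc) := by simp
    by_cases hx : x = cn
    · -- extend the current run
      subst hx
      have hb : pvBStep (init ++ [(x, cc)]) x = init ++ [(x, cc + 1)] := by
        unfold pvBStep
        rw [hlast]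
        simp [List.dropLast_concat]
      rw [hb]
      have hstep : pvAStep (x, cc, pvPick' (pvFM? init) (x, cc)) x
          = (x, cc + 1, pvPick' (pvFM? init) (x, cc + 1)) := by
        cases init with
        | nil =>
          simp only [pvAStep, pvPick', pvFM?]
          simp
        | cons h s =>
          simp only [pvAStep, pvPick', pvFM?, pvPick]
          set b := s.foldl pvPick h with hbdef
          by_cases h1 : cc > b.2
          · simp only [if_pos h1, if_pos (by omega : cc + 1 > b.2)]
            simp
          · simp only [if_neg h1]
            by_cases h2 : cc + 1 > b.2 <;> simp [h1, h2]
      rw [hstep]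
      exact ih init x (cc + 1) (by omega) hinit
    · -- start a new run
      have hb : pvBStep (init ++ [(cn, cc)]) x = (init ++ [(cn, cc)]) ++ [(x, 1)] := by
        unfold pvBStep
        rw [hlast]
        simp [Ne.symm hx]
      rw [hb]
      have hm : 1 ≤ (pvPick' (pvFM? init) (cn, cc)).2 := pvPick'_pos init (cn, cc) hcc hinit
      have hstep : pvAStep (cn, cc, pvPick' (pvFM? init) (cn, cc)) x
          = (x, 1, pvPick' (pvFM? (init ++ [(cn, cc)])) (x, 1)) := by
        rw [pvFM_concat]
        set m := pvPick' (pvFM? init) (cn, cc) with hmdef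
        simp only [pvAStep, pvPick', pvPick]
        rw [if_neg hx]
        simp only []
        rw [if_neg (show ¬ ((1:Int) > m.2) by omega),
            if_neg (show ¬ ((1:Int) > m.2) by omega)]
      rw [hstep]
      exact ih (init ++ [(cn, cc)]) x 1 (by omega)
        (by intro r hr; rcases List.mem_append.mp hr with h | h
            · exact hinit r h
            · simp at h; simp [h]; exact hcc)

lemma pvMaxByLen_stateOf (rs : List (Int × Int)) (h : rs ≠ []) :
    pvMaxByLen rs = (pvStateOf rs).2.2 := by
  obtain ⟨init, l, rfl⟩ := (List.eq_nil_or_concat rs).resolve_left h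
  simp only [List.concat_eq_append] at *
  rw [pvMaxByLen_concat]
  simp [pvStateOf, List.getLastD_concat, List.dropLast_concat]

-- ===== VERDICT (by name: the statement is the Claim_ definition above) =====
theorem sum_consecutive_spec : Claim_equal_sum_consecutive := by
  intro lst _
  unfold Spec_sum_consecutive
  cases lst with
  | nil => rfl
  | cons h t =>
    unfold sum_consecutive sum_consecutive_alt
    simp only [List.foldl_cons, if_neg (List.cons_ne_nil h t)]
    have hseed : pvBStep [] h = [(h, 1)] := by simp [pvBStep]
    rw [hseed]
    have hmain := pv_main t [] h 1 (by omega) (by simp)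
    simp only [List.nil_append] at hmain
    have hm : pvPick' (pvFM? []) (h, 1) = (h, 1) := rfl
    rw [hm] at hmain
    have hne : t.foldl pvBStep [(h, 1)] ≠ [] := pvBFold_ne_nil t _ (by simp)
    rw [hmain, pvMaxByLen_stateOf _ hne]
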